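-- pv_equiv track=rewrite | github.com/SidRoy97/Codes | BuyingEverything.py | minimumTime
-- ===== SOURCE A (Python) =====
-- import math
--
-- def minimumTime(b, m, k):
--     if(b.count(1) < m):
--         return -1
--     else:
--         ones = [i for i, x in enumerate(b) if x == 1]
--         i = 1
--         distances = []
--         while(i < len(ones)):
--             distances.append(ones[i] - ones[i-1])
--             i += 1
--         i = 0
--
--         min = math.inf
--         min_index = 0
--
--         while(i <= (len(distances) - (m - 1))):
--             if(sum(distances[i : (i + (m-1))]) < min):
--                 min = sum(distances[i : (i + (m-1))])
--                 min_index = i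
--             i += 1
--         shops = ones[min_index: (min_index + m)]
--
--         cost = shops[0]
--         i = 1
--         while(i < len(shops)):
--             cost += (shops[i] - shops[i - 1]) * (i * k)
--             i += 1
--         return cost
-- ===== SOURCE B (Python) =====
-- def minimumTime(b, m, k):
--     if b.count(1) < m:
--         return -1
--     # positions of open shops
--     ones = [i for i, x in enumerate(b) if x == 1]
--     # the sum of consecutive gaps in a window of m ones telescopes to
--     # ones[i+m-1] - ones[i]: pick the first window minimising that span.
--     best = 0
--     for i in range(1, len(ones) - m + 1):
--         if ones[i + m - 1] - ones[i] < ones[best + m - 1] - ones[best]: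
--             best = i
--     w = ones[best:best + m]
--     # cost = w[0] + sum_{i=1}^{m-1} (w[i]-w[i-1])*i*k, which Abel-sums to:
--     return w[0] + k * ((m - 1) * w[-1] - sum(w[:-1]))
-- ===== Notes on version B (the rewrite author's own statement) =====
-- stated objective: alternative
-- what changed: B drops A's distances list entirely: the window sum sum(distances[i:i+m-1]) is replaced by the telescoped span ones[i+m-1]-ones[i] compared in a single argmin pass, and the weighted-gap cost loop is replaced by its Abel-summed closed form w[0]+k*((m-1)*w[-1]-sum(w[:-1])).
-- outside the precondition, e.g. on minimumTime([1, 1], -1, 1): A returns 0, B raises IndexError; on minimumTime([1, 1, 1], -1, 2): A returns 2, B raises IndexError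
import Mathlib
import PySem

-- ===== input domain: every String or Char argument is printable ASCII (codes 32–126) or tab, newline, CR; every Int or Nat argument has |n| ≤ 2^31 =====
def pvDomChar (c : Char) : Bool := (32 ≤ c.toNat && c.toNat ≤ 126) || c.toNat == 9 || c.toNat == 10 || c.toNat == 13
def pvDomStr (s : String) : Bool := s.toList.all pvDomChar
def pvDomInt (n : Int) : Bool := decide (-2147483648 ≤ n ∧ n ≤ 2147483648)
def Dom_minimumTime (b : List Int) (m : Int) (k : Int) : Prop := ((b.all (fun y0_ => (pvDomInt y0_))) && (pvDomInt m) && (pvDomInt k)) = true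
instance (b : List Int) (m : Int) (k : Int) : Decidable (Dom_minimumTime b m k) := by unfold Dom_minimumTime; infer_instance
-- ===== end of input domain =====

-- B replaces A's re-summed gap windows by the telescoped window span
-- ones[i+m-1]-ones[i] and an Abel-summed closed form for the cost (alternative).

-- ===== PORT A =====
def minimumTime (b : List Int) (m : Int) (k : Int) : Int :=
  if ((PySem.List.count b 1 : Nat) : Int) < m then -1
  else
    let ones : List Int := (PySem.List.enumerate b 0).foldl
      (fun acc p => if p.2 == 1 then acc ++ [p.1] else acc) []
    let distances : List Int := (PySem.List.pyRange 1 (ones.length : Int) 1).foldl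
      (fun acc i => acc ++ [PySem.List.pyGetD ones i 0 - PySem.List.pyGetD ones (i - 1) 0]) []
    -- min starts at math.inf, modelled as 'none': 's < inf' is true exactly when st.1 = none
    let st := (PySem.List.pyRange 0 ((distances.length : Int) - (m - 1) + 1) 1).foldl
      (fun (st : Option Int × Int) i =>
        let s := (PySem.List.slice distances (some i) (some (i + (m - 1)))).sum
        if st.1.all (fun mn => decide (s < mn)) then (some s, i) else st)
      (none, 0)
    let min_index := st.2
    let shops := PySem.List.slice ones (some min_index) (some (min_index + m))
    -- shops[0]: Python raises on empty shops; such inputs are outside Pre_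
    (PySem.List.pyRange 1 (shops.length : Int) 1).foldl
      (fun c i => c + (PySem.List.pyGetD shops i 0 - PySem.List.pyGetD shops (i - 1) 0) * (i * k))
      (PySem.List.pyGetD shops 0 0)

-- ===== PORT B =====
def minimumTime_alt (b : List Int) (m : Int) (k : Int) : Int :=
  if ((PySem.List.count b 1 : Nat) : Int) < m then -1
  else
    let ones : List Int := (PySem.List.enumerate b 0).filterMap
      (fun p => if p.2 == 1 then some p.1 else none)
    let best := (PySem.List.pyRange 1 ((ones.length : Int) - m + 1) 1).foldl
      (fun best i =>
        if PySem.List.pyGetD ones (i + m - 1) 0 - PySem.List.pyGetD ones i 0 <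
           PySem.List.pyGetD ones (best + m - 1) 0 - PySem.List.pyGetD ones best 0
        then i else best) 0
    let w := PySem.List.slice ones (some best) (some (best + m))
    -- w[0] and w[-1]: Python raises on empty w; such inputs are outside Pre_
    PySem.List.pyGetD w 0 0 +
      k * ((m - 1) * PySem.List.pyGetD w (-1) 0 - (PySem.List.slice w none (some (-1))).sum)

-- ===== PRECONDITION & SPEC =====
-- Pre_ excludes non-positive m, on which A usually raises IndexError (shops ends
-- up empty) and, when it does return, the value is an accident of Python's
-- negative-slice wraparound; B naturally raises IndexError there.
def Pre_minimumTime (b : List Int) (m : Int) (k : Int) : Prop := 1 ≤ m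
instance (b : List Int) (m : Int) (k : Int) : Decidable (Pre_minimumTime b m k) := by
  unfold Pre_minimumTime; infer_instance
def pvWitness_minimumTime : List Int × Int × Int := ([1, 0, 1, 1], 2, 3)

def Spec_minimumTime (b : List Int) (m : Int) (k : Int) (out : Int) : Prop := out = minimumTime_alt b m k
instance (b : List Int) (m : Int) (k : Int) (out : Int) : Decidable (Spec_minimumTime b m k out) := by unfold Spec_minimumTime; infer_instance

-- ===== CLAIM (what is proved, stated in full; the proofs are below) =====
def Claim_equal_minimumTime : Prop := ∀ (b : List Int) (m : Int) (k : Int), Dom_minimumTime b m k → Pre_minimumTime b m k → Spec_minimumTime b m k (minimumTime b m k)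

-- ===== LEMMAS AND PROOFS =====

-- the two spellings of the 'ones' comprehension agree
theorem map_filter_fst (l : List (Int × Int)) :
    (l.filter (fun p => p.2 == 1)).map (fun p => p.1)
    = l.filterMap (fun p => if p.2 == 1 then some p.1 else none) := by
  induction l with
  | nil => simp
  | cons p t ih => by_cases h : p.2 = 1 <;> simp [h, ih]

theorem ones_foldl_eq_filterMap (b : List Int) :
    (PySem.List.enumerate b 0).foldl
      (fun acc p => if p.2 == 1 then acc ++ [p.1] else acc) ([] : List Int)
    = (PySem.List.enumerate b 0).filterMap
      (fun p => if p.2 == 1 then some p.1 else none) := by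
  rw [PySem.List.foldl_append_if (fun p => p.2 == 1) (fun p : Int × Int => p.1)]
  rw [List.nil_append, map_filter_fst]

-- length of 'ones' is b.count(1)
theorem length_ones_eq_count (b : List Int) : ∀ (s : Int),
    ((PySem.List.enumerate b s).filterMap
      (fun p => if p.2 == 1 then some p.1 else none)).length = PySem.List.count b 1 := by
  induction b with
  | nil => intro s; simp [PySem.List.enumerate_nil, PySem.List.count]
  | cons x xs ih =>
    intro s
    have h2 := ih (s + 1)
    rw [PySem.List.enumerate_cons]
    by_cases h : x = 1 <;> simp [h, PySem.List.count] at * <;> omega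

-- A's (min, min_index) fold with a live minimum equals the pure argmin fold
theorem argmin_fold (g : Int → Int) (l : List Int) : ∀ (j : Int),
    l.foldl
      (fun (st : Option Int × Int) i =>
        if st.1.all (fun mn => decide (g i < mn)) then (some (g i), i) else st)
      (some (g j), j)
    = (some (g (l.foldl (fun best i => if g i < g best then i else best) j)),
       l.foldl (fun best i => if g i < g best then i else best) j) := by
  induction l with
  | nil => intro j; simp
  | cons a t ih =>
    intro j
    simp only [List.foldl_cons]
    by_cases h : g a < g j <;> simp [h, ih]

-- A's fold starting from (math.inf, 0): the first window always replaces 'inf'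
theorem argmin_fold_none (g : Int → Int) (l : List Int) (a j0 : Int) :
    (a :: l).foldl
      (fun (st : Option Int × Int) i =>
        if st.1.all (fun mn => decide (g i < mn)) then (some (g i), i) else st)
      (none, j0)
    = (some (g (l.foldl (fun best i => if g i < g best then i else best) a)),
       l.foldl (fun best i => if g i < g best then i else best) a) := by
  rw [List.foldl_cons]
  exact argmin_fold g l a

-- the argmin fold's accumulator stays in {j} ∪ l
theorem foldl_best_mem (g : Int → Int) (l : List Int) : ∀ (j : Int),
    l.foldl (fun best i => if g i < g best then i else best) j = j ∨
    l.foldl (fun best i => if g i < g best then i else best) j ∈ l := by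
  induction l with
  | nil => intro j; simp
  | cons a t ih =>
    intro j
    simp only [List.foldl_cons, List.mem_cons]
    by_cases h : g a < g j
    · rw [if_pos h]
      rcases ih a with h' | h'
      · exact Or.inr (Or.inl h')
      · exact Or.inr (Or.inr h')
    · rw [if_neg h]
      rcases ih j with h' | h'
      · exact Or.inl h'
      · exact Or.inr (Or.inr h')

-- two argmin folds agree when the keys agree on {j} ∪ l
theorem foldl_best_congr (g₁ g₂ : Int → Int) (l : List Int) : ∀ (j : Int),
    (∀ x, (x = j ∨ x ∈ l) → g₁ x = g₂ x) →
    l.foldl (fun best i => if g₁ i < g₁ best then i else best) j =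
    l.foldl (fun best i => if g₂ i < g₂ best then i else best) j := by
  induction l with
  | nil => intro j _; simp
  | cons a t ih =>
    intro j h
    simp only [List.foldl_cons]
    rw [h a (by simp), h j (by simp)]
    by_cases hc : g₂ a < g₂ j <;> simp [hc] <;>
      exact ih _ (fun x hx => h x (by rcases hx with h' | h' <;> simp [h']))

-- telescoping sum of consecutive differences
theorem tele_sum (u : Nat → Int) : ∀ (c : Nat),
    ((List.range c).map (fun j => u (j + 1) - u j)).sum = u c - u 0 := by
  intro c
  induction c with
  | zero => simp
  | succ n ih => rw [List.range_succ]; simp [ih]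

theorem take_range'_min (s n m : Nat) : (List.range' s n).take m = List.range' s (min m n) := by
  induction n generalizing s m with
  | zero => simp
  | succ n ih =>
    cases m with
    | zero => simp
    | succ m => simp [List.range'_succ, List.take_succ_cons, ih, Nat.succ_min_succ]

-- A's window sum over 'distances' telescopes to B's window span over 'ones'
theorem span_eq (O : List Int) (m' : Nat) (hm : 1 ≤ m') (t : Nat) (ht : t + m' ≤ O.length) :
    (PySem.List.slice
      ((PySem.List.pyRange 1 (O.length : Int) 1).map
        (fun i => PySem.List.pyGetD O i 0 - PySem.List.pyGetD O (i - 1) 0))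
      (some (t : Int)) (some ((t : Int) + ((m' : Int) - 1)))).sum
    = PySem.List.pyGetD O ((t : Int) + (m' : Int) - 1) 0 - PySem.List.pyGetD O (t : Int) 0 := by
  have hL1 : 1 ≤ O.length := by omega
  rw [show ((m' : Int) - 1) = ((m' - 1 : Nat) : Int) by omega]
  rw [PySem.List.slice_natCast_add]
  rw [PySem.List.pyRange_one]
  rw [show ((O.length : Int) - 1).toNat = O.length - 1 by omega]
  rw [List.map_map, List.range_eq_range']
  rw [← List.map_drop, List.drop_range']
  rw [← List.map_take, take_range'_min]
  rw [show min (m' - 1) (O.length - 1 - t) = m' - 1 by omega]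
  rw [List.range'_eq_map_range, List.map_map]
  simp only [Nat.zero_add, Nat.mul_one]
  have hfun : ∀ j ∈ List.range (m' - 1),
      (((fun i => PySem.List.pyGetD O i 0 - PySem.List.pyGetD O (i - 1) 0) ∘ fun k : Nat => 1 + (k : Int)) ∘ fun j => t + j) j
      = (fun j => (fun c : Nat => PySem.List.pyGetD O ((t + c : Nat) : Int) 0) (j + 1) - (fun c : Nat => PySem.List.pyGetD O ((t + c : Nat) : Int) 0) j) j := by
    intro j _
    simp only [Function.comp]
    have e1 : 1 + ((t + j : Nat) : Int) = ((t + (j + 1) : Nat) : Int) := by push_cast; ring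
    have e2 : 1 + ((t + j : Nat) : Int) - 1 = ((t + j : Nat) : Int) := by push_cast; ring
    rw [e2, e1]
  rw [List.map_congr_left hfun]
  rw [tele_sum (fun c : Nat => PySem.List.pyGetD O ((t + c : Nat) : Int) 0) (m' - 1)]
  have e3 : ((t + (m' - 1) : Nat) : Int) = (t : Int) + (m' : Int) - 1 := by omega
  rw [e3]
  simp

-- the weighted-gap cost loop Abel-sums to B's closed form
theorem cost_fold_eq (s : List Int) (k : Int) (c : Int) : ∀ (t : Nat), t < s.length →
    (PySem.List.pyRange 1 ((t : Int) + 1) 1).foldl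
      (fun c i => c + (PySem.List.pyGetD s i 0 - PySem.List.pyGetD s (i - 1) 0) * (i * k)) c
    = c + k * ((t : Int) * PySem.List.pyGetD s (t : Int) 0 - (s.take t).sum) := by
  intro t
  induction t with
  | zero => intro _; rw [show ((0:Nat):Int) + 1 = 1 by norm_num, PySem.List.pyRange_one_eq_nil le_rfl]; simp
  | succ n ih =>
    intro ht
    have hn : n < s.length := by omega
    have h1 : ((n+1 : Nat) : Int) + 1 = (((n:Int)+1)) + 1 := by push_cast; ring
    rw [h1, PySem.List.pyRange_one_succ_right (by omega), List.foldl_append, ih hn]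
    simp only [List.foldl_cons, List.foldl_nil]
    rw [show ((n:Int)+1) - 1 = (n:Int) by ring]
    rw [show ((n:Int)+1) = (((n+1:Nat)):Int) by push_cast; ring]
    rw [PySem.List.pyGetD_eq_getElem s (i := ((n+1:Nat):Int)) 0 (by positivity) (by exact_mod_cast ht)]
    rw [PySem.List.pyGetD_eq_getElem s (i := ((n:Nat):Int)) 0 (by positivity) (by exact_mod_cast hn)]
    rw [List.take_add_one]
    have hg : s[n]? = some s[n] := List.getElem?_eq_getElem hn
    simp only [hg, Option.toList_some, List.sum_append, List.sum_cons, List.sum_nil]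
    have h2 : ((n+1:Nat):Int).toNat = n+1 := by omega
    have h3 : ((n:Nat):Int).toNat = n := by omega
    simp only [h2, h3]
    push_cast
    ring

-- s[-1] on a nonempty list is s[len-1]
theorem pyGetD_neg_one (s : List Int) (h : s ≠ []) :
    PySem.List.pyGetD s (-1) 0 = PySem.List.pyGetD s ((s.length - 1 : Nat) : Int) 0 := by
  have hl : 1 ≤ s.length := List.length_pos_iff.mpr h
  simp only [PySem.List.pyGetD, PySem.List.pyGet?, PySem.List.pyIdx?]
  have c1 : ¬ ((0:Int) ≤ -1) := by norm_num
  have c2 : -((s.length : Nat) : Int) ≤ -1 := by omega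
  rw [if_neg c1, if_pos c2]
  have c3 : (0:Int) ≤ ((s.length - 1 : Nat) : Int) := by positivity
  have c4 : ((s.length - 1 : Nat) : Int) < (s.length : Int) := by omega
  rw [if_pos c3, if_pos c4]
  have e1 : (- -1 : Int).toNat = 1 := by norm_num
  have e2 : ((s.length - 1 : Nat) : Int).toNat = s.length - 1 := by omega
  rw [e1, e2]

-- ===== VERDICT (by name: the statement is the Claim_ definition above) =====
theorem minimumTime_spec : Claim_equal_minimumTime := by
  intro b m k _ hpre
  obtain ⟨m', rfl⟩ : ∃ m' : Nat, m = (m' : Int) := ⟨m.toNat, by unfold Pre_minimumTime at hpre; omega⟩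
  have hm1 : 1 ≤ m' := by unfold Pre_minimumTime at hpre; omega
  unfold Spec_minimumTime minimumTime minimumTime_alt
  rw [ones_foldl_eq_filterMap]
  set O : List Int := (PySem.List.enumerate b 0).filterMap
    (fun p => if p.2 == 1 then some p.1 else none) with hO
  have hcount : ((PySem.List.count b 1 : Nat) : Int) = ((O.length : Nat) : Int) := by
    rw [← length_ones_eq_count b 0]
  by_cases hlt : ((PySem.List.count b 1 : Nat) : Int) < (m' : Int)
  · rw [if_pos hlt, if_pos hlt]
  · rw [if_neg hlt, if_neg hlt]
    have hmL : m' ≤ O.length := by rw [hcount] at hlt; exact_mod_cast not_lt.mp hlt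
    have hL1 : 1 ≤ O.length := le_trans hm1 hmL
    dsimp only []
    have hD : List.foldl (fun acc i => acc ++ [(fun i => PySem.List.pyGetD O i 0 - PySem.List.pyGetD O (i - 1) 0) i]) ([] : List Int)
        (PySem.List.pyRange 1 ((O.length : Nat) : Int) 1)
        = List.map (fun i => PySem.List.pyGetD O i 0 - PySem.List.pyGetD O (i - 1) 0) (PySem.List.pyRange 1 ((O.length : Nat) : Int) 1) := by
      rw [PySem.List.foldl_append_singleton_eq_map]
      exact List.nil_append _
    rw [hD]
    have hb : ((List.map (fun i => PySem.List.pyGetD O i 0 - PySem.List.pyGetD O (i - 1) 0) (PySem.List.pyRange 1 ((O.length : Nat) : Int) 1)).length : Int) - (((m' : Nat) : Int) - 1) + 1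
        = ((O.length : Nat) : Int) - ((m' : Nat) : Int) + 1 := by
      simp [PySem.List.length_pyRange_one]
      omega
    rw [hb]
    rw [PySem.List.pyRange_one_cons (show (0:Int) < ((O.length : Nat) : Int) - ((m' : Nat) : Int) + 1 by omega)]
    simp only [zero_add]
    rw [argmin_fold_none (fun i : Int => (PySem.List.slice (List.map (fun i => PySem.List.pyGetD O i 0 - PySem.List.pyGetD O (i - 1) 0) (PySem.List.pyRange 1 ((O.length : Nat) : Int) 1)) (some i) (some (i + (((m' : Nat) : Int) - 1)))).sum) (PySem.List.pyRange 1 (((O.length : Nat) : Int) - ((m' : Nat) : Int) + 1) 1) 0 0]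
    have hagree : ∀ x, (x = 0 ∨ x ∈ (PySem.List.pyRange 1 (((O.length : Nat) : Int) - ((m' : Nat) : Int) + 1) 1)) → (fun i : Int => (PySem.List.slice (List.map (fun i => PySem.List.pyGetD O i 0 - PySem.List.pyGetD O (i - 1) 0) (PySem.List.pyRange 1 ((O.length : Nat) : Int) 1)) (some i) (some (i + (((m' : Nat) : Int) - 1)))).sum) x = (fun i : Int => PySem.List.pyGetD O (i + ((m' : Nat) : Int) - 1) 0 - PySem.List.pyGetD O i 0) x := by
      intro x hx
      have hx' : 0 ≤ x ∧ x ≤ ((O.length : Nat) : Int) - ((m' : Nat) : Int) := by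
        rcases hx with rfl | hx
        · constructor <;> omega
        · rw [PySem.List.mem_pyRange_one] at hx; omega
      obtain ⟨t, rfl⟩ : ∃ t : Nat, x = (t : Int) := ⟨x.toNat, by omega⟩
      have ht : t + m' ≤ O.length := by omega
      exact span_eq O m' hm1 t ht
    rw [foldl_best_congr (fun i : Int => (PySem.List.slice (List.map (fun i => PySem.List.pyGetD O i 0 - PySem.List.pyGetD O (i - 1) 0) (PySem.List.pyRange 1 ((O.length : Nat) : Int) 1)) (some i) (some (i + (((m' : Nat) : Int) - 1)))).sum) (fun i : Int => PySem.List.pyGetD O (i + ((m' : Nat) : Int) - 1) 0 - PySem.List.pyGetD O i 0) (PySem.List.pyRange 1 (((O.length : Nat) : Int) - ((m' : Nat) : Int) + 1) 1) 0 hagree]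
    have hmem := foldl_best_mem (fun i : Int => PySem.List.pyGetD O (i + ((m' : Nat) : Int) - 1) 0 - PySem.List.pyGetD O i 0) (PySem.List.pyRange 1 (((O.length : Nat) : Int) - ((m' : Nat) : Int) + 1) 1) 0
    beta_reduce at hmem ⊢
    have hbnd : 0 ≤ (List.foldl (fun best i => if PySem.List.pyGetD O (i + ((m' : Nat) : Int) - 1) 0 - PySem.List.pyGetD O i 0 < PySem.List.pyGetD O (best + ((m' : Nat) : Int) - 1) 0 - PySem.List.pyGetD O best 0 then i else best) 0 (PySem.List.pyRange 1 (((O.length : Nat) : Int) - ((m' : Nat) : Int) + 1) 1)) ∧ (List.foldl (fun best i => if PySem.List.pyGetD O (i + ((m' : Nat) : Int) - 1) 0 - PySem.List.pyGetD O i 0 < PySem.List.pyGetD O (best + ((m' : Nat) : Int) - 1) 0 - PySem.List.pyGetD O best 0 then i else best) 0 (PySem.List.pyRange 1 (((O.length : Nat) : Int) - ((m' : Nat) : Int) + 1) 1)) ≤ ((O.length : Nat) : Int) - ((m' : Nat) : Int) := by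
      rcases hmem with h' | h'
      · rw [h']; constructor <;> omega
      · rw [PySem.List.mem_pyRange_one] at h'; constructor <;> omega
    obtain ⟨bt, hbt⟩ : ∃ t : Nat, (List.foldl (fun best i => if PySem.List.pyGetD O (i + ((m' : Nat) : Int) - 1) 0 - PySem.List.pyGetD O i 0 < PySem.List.pyGetD O (best + ((m' : Nat) : Int) - 1) 0 - PySem.List.pyGetD O best 0 then i else best) 0 (PySem.List.pyRange 1 (((O.length : Nat) : Int) - ((m' : Nat) : Int) + 1) 1)) = (t : Int) ∧ t + m' ≤ O.length := by
      refine ⟨((List.foldl (fun best i => if PySem.List.pyGetD O (i + ((m' : Nat) : Int) - 1) 0 - PySem.List.pyGetD O i 0 < PySem.List.pyGetD O (best + ((m' : Nat) : Int) - 1) 0 - PySem.List.pyGetD O best 0 then i else best) 0 (PySem.List.pyRange 1 (((O.length : Nat) : Int) - ((m' : Nat) : Int) + 1) 1))).toNat, ?_, ?_⟩ <;> omega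
    rw [hbt.1]
    rw [PySem.List.slice_natCast_add]
    have hslen : ((List.drop bt O).take m').length = m' := by
      simp
      omega
    have hne : (List.drop bt O).take m' ≠ [] := by
      apply List.ne_nil_of_length_pos
      omega
    have hclen : (((List.drop bt O).take m').length : Int) = ((m' - 1 : Nat) : Int) + 1 := by
      rw [hslen]; omega
    rw [hclen]
    rw [cost_fold_eq ((List.drop bt O).take m') k _ (m' - 1) (by rw [hslen]; omega)]
    rw [PySem.List.slice_to_neg_one, List.dropLast_eq_take]
    rw [pyGetD_neg_one _ hne]
    rw [hslen]
    rw [show (((m' : Nat) : Int) - 1) = ((m' - 1 : Nat) : Int) by omega]
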